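-- pv_equiv track=rewrite | github.com/TamirOffen/OptimalChessAgent | GeneticAlgo/GA_training.py | rook_atck_weak_pawn_open_column
-- ===== SOURCE A (Python) =====
-- def rook_atck_weak_pawn_open_column(board, rook_array, backward_pawns_array, isolated_pawns_array, semi_open_file_array):
--
--   num_rooks_attacking = 0
--   for rook_position in rook_array:
--     if rook_position[1] not in semi_open_file_array:
--       continue
--     for backward_pawn in backward_pawns_array:
--       if backward_pawn[1] == rook_position[1]:
--         num_rooks_attacking += 1
--     for isolated_pawn in isolated_pawns_array:
--       if isolated_pawn[1] == rook_position[1]: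
--         num_rooks_attacking += 1
--
--   return num_rooks_attacking
-- ===== SOURCE B (Python) =====
-- def rook_atck_weak_pawn_open_column(board, rook_array, backward_pawns_array, isolated_pawns_array, semi_open_file_array):
--     # count semi-open-file rooks per column (set membership), then one pass over each pawn list
--     semi_open = set(semi_open_file_array)
--     rooks_per_col = {}
--     for rook in rook_array:
--         col = rook[1]
--         if col in semi_open:
--             rooks_per_col[col] = rooks_per_col.get(col, 0) + 1
--     total = 0
--     for pawn in backward_pawns_array + isolated_pawns_array:
--         total += rooks_per_col.get(pawn[1], 0)
--     return total
-- ===== Notes on version B (the rewrite author's own statement) =====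
-- stated objective: faster
-- what changed: Replaces the rook-outer/pawn-inner nested scan with a set of semi-open files plus a single pass building a per-column counter of semi-open-file rooks, then one pass over the concatenated pawn lists summing counter lookups.
import Mathlib
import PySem

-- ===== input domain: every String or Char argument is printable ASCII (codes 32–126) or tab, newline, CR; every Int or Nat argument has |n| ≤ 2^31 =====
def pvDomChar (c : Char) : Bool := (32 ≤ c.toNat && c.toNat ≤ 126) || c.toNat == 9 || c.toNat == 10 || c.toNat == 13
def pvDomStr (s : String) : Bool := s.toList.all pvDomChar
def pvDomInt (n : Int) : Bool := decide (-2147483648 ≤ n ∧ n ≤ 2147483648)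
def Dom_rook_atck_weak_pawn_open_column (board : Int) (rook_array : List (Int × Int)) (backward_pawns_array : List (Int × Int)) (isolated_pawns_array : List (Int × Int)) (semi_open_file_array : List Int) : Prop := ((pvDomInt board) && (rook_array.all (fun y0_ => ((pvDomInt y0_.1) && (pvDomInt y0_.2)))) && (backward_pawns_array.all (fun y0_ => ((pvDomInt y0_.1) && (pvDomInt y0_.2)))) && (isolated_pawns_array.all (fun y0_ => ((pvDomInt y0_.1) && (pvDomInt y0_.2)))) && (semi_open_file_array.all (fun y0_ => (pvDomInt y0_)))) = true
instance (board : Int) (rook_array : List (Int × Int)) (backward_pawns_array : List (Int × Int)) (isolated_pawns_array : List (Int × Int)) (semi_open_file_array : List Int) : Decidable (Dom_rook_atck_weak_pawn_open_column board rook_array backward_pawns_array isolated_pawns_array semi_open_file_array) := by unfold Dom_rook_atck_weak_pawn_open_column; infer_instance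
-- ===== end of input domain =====

-- B builds a per-column counter of semi-open-file rooks once, then sums counter lookups over both pawn lists (index build vs nested scans).
-- ===== PORT A =====
def rook_atck_weak_pawn_open_column (board : Int) (rook_array : List (Int × Int)) (backward_pawns_array : List (Int × Int)) (isolated_pawns_array : List (Int × Int)) (semi_open_file_array : List Int) : Int :=
  rook_array.foldl (fun num_rooks_attacking rook_position =>
    if rook_position.2 ∈ semi_open_file_array then
      let n1 := backward_pawns_array.foldl (fun n backward_pawn =>
        if backward_pawn.2 = rook_position.2 then n + 1 else n) num_rooks_attacking
      isolated_pawns_array.foldl (fun n isolated_pawn =>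
        if isolated_pawn.2 = rook_position.2 then n + 1 else n) n1
    else num_rooks_attacking) 0

-- ===== PORT B =====
def rook_atck_weak_pawn_open_column_alt (board : Int) (rook_array : List (Int × Int)) (backward_pawns_array : List (Int × Int)) (isolated_pawns_array : List (Int × Int)) (semi_open_file_array : List Int) : Int :=
  let semi_open : PySem.Set Int := PySem.Set.ofList semi_open_file_array
  let rooks_per_col : PySem.Dict Int Int := rook_array.foldl (fun d rook =>
    if rook.2 ∈ semi_open then d.insert rook.2 (d.getD rook.2 0 + 1) else d)
    PySem.Dict.empty
  (backward_pawns_array ++ isolated_pawns_array).foldl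
    (fun total pawn => total + rooks_per_col.getD pawn.2 0) 0

-- ===== PRECONDITION & SPEC =====
def Spec_rook_atck_weak_pawn_open_column (board : Int) (rook_array : List (Int × Int)) (backward_pawns_array : List (Int × Int)) (isolated_pawns_array : List (Int × Int)) (semi_open_file_array : List Int) (out : Int) : Prop := out = rook_atck_weak_pawn_open_column_alt board rook_array backward_pawns_array isolated_pawns_array semi_open_file_array
instance (board : Int) (rook_array : List (Int × Int)) (backward_pawns_array : List (Int × Int)) (isolated_pawns_array : List (Int × Int)) (semi_open_file_array : List Int) (out : Int) : Decidable (Spec_rook_atck_weak_pawn_open_column board rook_array backward_pawns_array isolated_pawns_array semi_open_file_array out) := by unfold Spec_rook_atck_weak_pawn_open_column; infer_instance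

-- ===== CLAIM (what is proved, stated in full; the proofs are below) =====
def Claim_equal_rook_atck_weak_pawn_open_column : Prop := ∀ (board : Int) (rook_array : List (Int × Int)) (backward_pawns_array : List (Int × Int)) (isolated_pawns_array : List (Int × Int)) (semi_open_file_array : List Int), Dom_rook_atck_weak_pawn_open_column board rook_array backward_pawns_array isolated_pawns_array semi_open_file_array → Spec_rook_atck_weak_pawn_open_column board rook_array backward_pawns_array isolated_pawns_array semi_open_file_array (rook_atck_weak_pawn_open_column board rook_array backward_pawns_array isolated_pawns_array semi_open_file_array)

-- ===== LEMMAS AND PROOFS =====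

-- number of rooks on semi-open files in column c
def pvQCount (rooks : List (Int × Int)) (semi : List Int) (c : Int) : Int :=
  ((rooks.filter (fun r => decide (r.2 ∈ semi))).countP (fun r => r.2 == c) : Int)

theorem pvQCount_cons_mem {r : Int × Int} {semi : List Int} (hs : r.2 ∈ semi)
    (rooks : List (Int × Int)) (c : Int) :
    pvQCount (r :: rooks) semi c = (if c = r.2 then 1 else 0) + pvQCount rooks semi c := by
  simp only [pvQCount, List.filter_cons, hs, decide_true, List.countP_cons]
  by_cases hc : c = r.2
  · simp [hc, add_comm]
  · have hne : (r.2 == c) = false := by simp; exact fun h => hc h.symm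
    simp [hne, hc]

theorem pvQCount_cons_not_mem {r : Int × Int} {semi : List Int} (hs : r.2 ∉ semi)
    (rooks : List (Int × Int)) (c : Int) :
    pvQCount (r :: rooks) semi c = pvQCount rooks semi c := by
  simp [pvQCount, List.filter_cons, hs]

-- the counter built by B's first loop holds pvQCount at every column
theorem pv_getD_counter_loop (semi : List Int) (rooks : List (Int × Int))
    (d : PySem.Dict Int Int) (c : Int) :
    (rooks.foldl (fun d r => if r.2 ∈ semi then d.insert r.2 (d.getD r.2 0 + 1) else d) d).getD c 0
      = d.getD c 0 + pvQCount rooks semi c := by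
  induction rooks generalizing d with
  | nil => simp [pvQCount]
  | cons r rooks ih =>
    rw [List.foldl_cons]
    by_cases hs : r.2 ∈ semi
    · rw [if_pos hs, ih, PySem.Dict.getD_insert, pvQCount_cons_mem hs]
      by_cases hc : c = r.2
      · simp only [hc, if_pos]; ring
      · simp only [if_neg hc]; ring
    · rw [if_neg hs, ih, pvQCount_cons_not_mem hs]

-- A's inner pawn loop counts matching pawns
theorem pv_innerA (pawns : List (Int × Int)) (c acc : Int) :
    pawns.foldl (fun n p => if p.2 = c then n + 1 else n) acc
      = acc + (pawns.countP (fun p => p.2 == c) : Int) := by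
  have h := PySem.List.foldl_count_if (fun p : Int × Int => p.2 == c) pawns acc
  simpa using h

-- A's outer loop is the sum of per-rook contributions
theorem pv_outerA (semi : List Int) (bp ip : List (Int × Int))
    (rooks : List (Int × Int)) (acc : Int) :
    rooks.foldl (fun num_rooks_attacking rook_position =>
      if rook_position.2 ∈ semi then
        let n1 := bp.foldl (fun n backward_pawn =>
          if backward_pawn.2 = rook_position.2 then n + 1 else n) num_rooks_attacking
        ip.foldl (fun n isolated_pawn =>
          if isolated_pawn.2 = rook_position.2 then n + 1 else n) n1
      else num_rooks_attacking) acc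
      = acc + (rooks.map (fun r => if r.2 ∈ semi then
          ((bp.countP (fun p => p.2 == r.2) : Int) + (ip.countP (fun p => p.2 == r.2) : Int))
          else 0)).sum := by
  induction rooks generalizing acc with
  | nil => simp
  | cons r rooks ih =>
    rw [List.foldl_cons, ih]
    by_cases hs : r.2 ∈ semi
    · simp only [if_pos hs, pv_innerA, List.map_cons, List.sum_cons]
      ring
    · simp only [if_neg hs, List.map_cons, List.sum_cons]
      ring

-- double counting: summing rook counts over pawns = summing pawn counts over rooks
theorem pv_swap (semi : List Int) (pawns : List (Int × Int)) (rooks : List (Int × Int)) :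
    (pawns.map (fun p => pvQCount rooks semi p.2)).sum
      = (rooks.map (fun r => if r.2 ∈ semi then (pawns.countP (fun p => p.2 == r.2) : Int) else 0)).sum := by
  induction rooks with
  | nil => simp [pvQCount]
  | cons r rooks ih =>
    by_cases hs : r.2 ∈ semi
    · calc (pawns.map (fun p => pvQCount (r :: rooks) semi p.2)).sum
          = (pawns.map (fun p => (if p.2 = r.2 then 1 else 0) + pvQCount rooks semi p.2)).sum := by
            simp only [pvQCount_cons_mem hs]
        _ = (pawns.map (fun p => if ((fun q : Int × Int => q.2 == r.2) p) = true then (1:Int) else 0)).sum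
              + (pawns.map (fun p => pvQCount rooks semi p.2)).sum := by
            rw [← PySem.List.sum_map_add_int]
            apply congrArg List.sum
            apply List.map_congr_left
            intro p _
            by_cases hp : p.2 = r.2 <;> simp [hp]
        _ = (pawns.countP (fun p => p.2 == r.2) : Int)
              + (rooks.map (fun r => if r.2 ∈ semi then (pawns.countP (fun p => p.2 == r.2) : Int) else 0)).sum := by
            rw [PySem.List.sum_map_ite_one_zero, ih]
        _ = _ := by simp only [List.map_cons, List.sum_cons, if_pos hs]
    · simp only [List.map_cons, List.sum_cons, if_neg hs, zero_add, pvQCount_cons_not_mem hs, ih]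

-- ===== VERDICT (by name: the statement is the Claim_ definition above) =====
theorem rook_atck_weak_pawn_open_column_spec : Claim_equal_rook_atck_weak_pawn_open_column := by
  intro board rooks bp ip semi _
  unfold Spec_rook_atck_weak_pawn_open_column
  unfold rook_atck_weak_pawn_open_column rook_atck_weak_pawn_open_column_alt
  rw [pv_outerA]
  simp only [PySem.Set.mem_ofList]
  simp only [PySem.List.foldl_add, pv_getD_counter_loop, PySem.Dict.getD_empty, zero_add]
  rw [pv_swap]
  simp only [List.countP_append, Nat.cast_add]
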